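-- pv_equiv track=rewrite | github.com/buse-tas/Gpt-from-scratch | neural_ngram.py | build_supervised_pairs
-- ===== SOURCE A (Python) =====
-- from typing import List, Tuple, Dict, Optional
--
-- BOS = "<bos>"
--
-- def build_supervised_pairs(
--     token_lines: List[List[str]],
--     n:           int,
-- ) -> List[Tuple[List[str], str]]:
--     """
--     Build (context[n-1], next_token) pairs with BOS left-padding.
--     Context is always exactly (n-1) tokens; pad with BOS at line start.
--     """
--     pairs = []
--     for line in token_lines:
--         padded = [BOS] * (n - 1) + line
--         for i in range(n - 1, len(padded)):
--             ctx    = padded[i - (n - 1) : i]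
--             target = padded[i]
--             pairs.append((ctx, target))
--     return pairs
-- ===== SOURCE B (Python) =====
-- from typing import List, Tuple
--
-- BOS = "<bos>"
--
--
-- def build_supervised_pairs(
--     token_lines: List[List[str]],
--     n:           int,
-- ) -> List[Tuple[List[str], str]]:
--     """Rolling-window re-implementation: no padded array, no index slicing.
--
--     A context window of exactly n-1 tokens is carried as state and refreshed
--     in O(n) per token by dropping its oldest element; n must be >= 1.
--     """
--     if n < 1:
--         raise ValueError("n must be >= 1")
--     pairs = []
--     bos_ctx = [BOS] * (n - 1)
--     for line in token_lines:
--         ctx = bos_ctx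
--         for tok in line:
--             pairs.append((ctx, tok))
--             ctx = (ctx + [tok])[1:]
--     return pairs
-- ===== Notes on version B (the rewrite author's own statement) =====
-- stated objective: alternative
-- what changed: Replaces the pad-then-reslice scheme (build a BOS-padded copy of each line, loop over integer indices, slice the context out of it) with a rolling context window carried as fold state and refreshed per token, so no padded array, no index arithmetic and no slicing are used.
-- outside the precondition, e.g. on build_supervised_pairs([['a', 'b']], 0): A returns [(['a'], 'b'), ([], 'a'), ([], 'b')], B raises ValueError; on build_supervised_pairs([[], ['a']], 0): A raises IndexError, B raises ValueError
import Mathlib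
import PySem

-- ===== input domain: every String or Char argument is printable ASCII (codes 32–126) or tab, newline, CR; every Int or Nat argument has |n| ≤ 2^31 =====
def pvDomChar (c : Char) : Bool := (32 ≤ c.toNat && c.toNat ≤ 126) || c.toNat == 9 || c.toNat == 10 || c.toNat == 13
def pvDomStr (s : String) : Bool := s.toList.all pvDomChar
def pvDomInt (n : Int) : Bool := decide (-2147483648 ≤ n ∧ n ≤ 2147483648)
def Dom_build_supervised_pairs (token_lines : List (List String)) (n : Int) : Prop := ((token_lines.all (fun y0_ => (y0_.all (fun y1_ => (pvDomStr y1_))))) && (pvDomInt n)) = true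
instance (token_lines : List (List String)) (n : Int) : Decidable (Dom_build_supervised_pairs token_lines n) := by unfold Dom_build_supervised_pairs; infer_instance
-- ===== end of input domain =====

-- B replaces A's pad-then-reslice scheme with a rolling context window carried as fold
-- state (objective: alternative decomposition, same cost).

-- ===== PORT A =====
def build_supervised_pairs (token_lines : List (List String)) (n : Int) : List (List String × String) :=
  token_lines.foldl (fun pairs line =>
    -- padded = [BOS] * (n - 1) + line  (Python list repetition: negative count gives [])
    let padded := List.replicate (n - 1).toNat "<bos>" ++ line
    (PySem.List.pyRange (n - 1) (padded.length : Int) 1).foldl (fun pairs i =>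
      let ctx := PySem.List.slice padded (some (i - (n - 1))) (some i)
      -- padded[i]: under Pre_ (n ≥ 1) the index is always in range, so no IndexError
      let target := PySem.List.pyGetD padded i ""
      pairs ++ [(ctx, target)]) pairs) []

-- ===== PORT B =====
def build_supervised_pairs_alt (token_lines : List (List String)) (n : Int) : List (List String × String) :=
  if n < 1 then []  -- Python B raises ValueError here; excluded by Pre_
  else
    let bos_ctx := List.replicate (n - 1).toNat "<bos>"
    token_lines.foldl (fun pairs line =>
      (line.foldl
        (fun (st : List (List String × String) × List String) tok =>
          (st.1 ++ [(st.2, tok)], PySem.List.slice (st.2 ++ [tok]) (some 1) none))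
        (pairs, bos_ctx)).1) []

-- ===== PRECONDITION & SPEC =====
-- Pre_ excludes n ≤ 0: there Python A raises IndexError on any empty line (and on very
-- negative n), and where it does return, its pairs come from negative-index wraparound;
-- Python B itself raises ValueError on every such n.
def Pre_build_supervised_pairs (token_lines : List (List String)) (n : Int) : Prop := 1 ≤ n
instance (token_lines : List (List String)) (n : Int) : Decidable (Pre_build_supervised_pairs token_lines n) := by unfold Pre_build_supervised_pairs; infer_instance

def pvWitness_build_supervised_pairs : List (List String) × Int := ([["a", "b"], ["c"]], 3)

def Spec_build_supervised_pairs (token_lines : List (List String)) (n : Int) (out : List (List String × String)) : Prop := out = build_supervised_pairs_alt token_lines n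
instance (token_lines : List (List String)) (n : Int) (out : List (List String × String)) : Decidable (Spec_build_supervised_pairs token_lines n out) := by unfold Spec_build_supervised_pairs; infer_instance

-- ===== CLAIM (what is proved, stated in full; the proofs are below) =====
def Claim_equal_build_supervised_pairs : Prop := ∀ (token_lines : List (List String)) (n : Int), Dom_build_supervised_pairs token_lines n → Pre_build_supervised_pairs token_lines n → Spec_build_supervised_pairs token_lines n (build_supervised_pairs token_lines n)

-- ===== LEMMAS AND PROOFS =====

-- The per-line pair stream both programs produce, as a structural recursion on the line.
def pairsLine (ctx : List String) : List String → List (List String × String)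
  | [] => []
  | t :: ts => (ctx, t) :: pairsLine ((ctx ++ [t]).drop 1) ts

lemma bline_eq (line : List String) :
    ∀ (ctx : List String) (pairs : List (List String × String)),
      (line.foldl
        (fun (st : List (List String × String) × List String) tok =>
          (st.1 ++ [(st.2, tok)], PySem.List.slice (st.2 ++ [tok]) (some 1) none))
        (pairs, ctx)).1 = pairs ++ pairsLine ctx line := by
  induction line with
  | nil => intro ctx pairs; simp [pairsLine]
  | cons t ts ih =>
      intro ctx pairs
      rw [List.foldl_cons, ih, pairsLine]
      simp [PySem.List.slice_from_one, List.drop_one]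

lemma aline_eq (k : Nat) (line : List String) :
    ∀ (pre : List String), pre.length = k →
      (List.range line.length).map
        (fun j => (((pre ++ line).drop j).take k, (pre ++ line).getD (k + j) ""))
        = pairsLine pre line := by
  induction line with
  | nil => intro pre _; simp [pairsLine]
  | cons t ts ih =>
      intro pre hpre
      have htail : (pre ++ t :: ts).drop 1 = (pre ++ [t]).drop 1 ++ ts := by
        have h : pre ++ t :: ts = (pre ++ [t]) ++ ts := by simp
        rw [h, List.drop_append_of_le_length (by simp)]
      have hk' : ((pre ++ [t]).drop 1).length = k := by simp [hpre]
      have hhead : ((pre ++ t :: ts).take k, (pre ++ t :: ts).getD (k + 0) "") = (pre, t) := by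
        subst hpre
        simp [List.getD]
      have hrest : ∀ j : Nat,
          (((pre ++ t :: ts).drop (j + 1)).take k, (pre ++ t :: ts).getD (k + (j + 1)) "")
            = ((((pre ++ [t]).drop 1 ++ ts).drop j).take k,
               ((pre ++ [t]).drop 1 ++ ts).getD (k + j) "") := by
        intro j
        have h1 : (pre ++ t :: ts).drop (j + 1) = ((pre ++ t :: ts).drop 1).drop j := by
          rw [List.drop_drop]; congr 1; omega
        have hidx : k + (j + 1) = 1 + (k + j) := by omega
        have h2 : (pre ++ t :: ts).getD (k + (j + 1)) ""
            = ((pre ++ t :: ts).drop 1).getD (k + j) "" := by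
          simp only [List.getD, List.getElem?_drop, hidx]
        rw [h1, h2, htail]
      rw [List.length_cons, List.range_succ_eq_map, List.map_cons, List.map_map, pairsLine]
      refine congrArg₂ List.cons hhead ?_
      rw [← ih ((pre ++ [t]).drop 1) hk']
      refine List.map_congr_left ?_
      intro j _
      simpa [Function.comp, Nat.succ_eq_add_one] using hrest j

-- ===== VERDICT (by name: the statement is the Claim_ definition above) =====
theorem build_supervised_pairs_spec : Claim_equal_build_supervised_pairs := by
  intro token_lines n hdom hpre
  unfold Spec_build_supervised_pairs build_supervised_pairs build_supervised_pairs_alt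
  have hn1 : ¬ n < 1 := not_lt.mpr hpre
  rw [if_neg hn1]
  set k := (n - 1).toNat with hk
  have hnk : (n - 1 : Int) = (k : Int) := by
    have : (1 : Int) ≤ n := hpre
    omega
  simp only [hnk]
  -- A's inner index loop over the padded line equals the canonical per-line stream
  have hA : ∀ (line : List String) (pairs : List (List String × String)),
      (PySem.List.pyRange (k : Int) ((List.replicate k "<bos>" ++ line).length : Int) 1).foldl
        (fun pairs i =>
          pairs ++ [(PySem.List.slice (List.replicate k "<bos>" ++ line) (some (i - (k : Int))) (some i),
                     PySem.List.pyGetD (List.replicate k "<bos>" ++ line) i "")]) pairs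
        = pairs ++ pairsLine (List.replicate k "<bos>") line := by
    intro line pairs
    set padded := List.replicate k "<bos>" ++ line with hpadded
    have hlen : padded.length = k + line.length := by simp [hpadded]
    rw [PySem.List.pyRange_one, List.foldl_map, PySem.List.foldl_append_singleton_eq_map]
    have hrange : ((padded.length : Int) - (k : Int)).toNat = line.length := by omega
    rw [hrange, ← aline_eq k line (List.replicate k "<bos>") (by simp)]
    congr 1
    refine List.map_congr_left ?_
    intro j hj
    have e1 : ((k : Int) + (j : Int)) - (k : Int) = ((j : Nat) : Int) := by ring
    have e2 : ((k : Int) + (j : Int)) = (((k + j : Nat)) : Int) := by push_cast; ring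
    rw [e1, e2, PySem.List.slice_natCast, PySem.List.pyGetD_natCast]
    have e3 : k + j - j = k := by omega
    rw [e3]
  -- both outer folds append a per-line block: reduce each to flatMap
  have hfA : (fun (pairs : List (List String × String)) (line : List String) =>
      (PySem.List.pyRange (k : Int) ((List.replicate k "<bos>" ++ line).length : Int) 1).foldl
        (fun pairs i =>
          pairs ++ [(PySem.List.slice (List.replicate k "<bos>" ++ line) (some (i - (k : Int))) (some i),
                     PySem.List.pyGetD (List.replicate k "<bos>" ++ line) i "")]) pairs)
      = fun pairs line => pairs ++ pairsLine (List.replicate k "<bos>") line := by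
    funext pairs line; exact hA line pairs
  have hfB : (fun (pairs : List (List String × String)) (line : List String) =>
      (line.foldl
        (fun (st : List (List String × String) × List String) tok =>
          (st.1 ++ [(st.2, tok)], PySem.List.slice (st.2 ++ [tok]) (some 1) none))
        (pairs, List.replicate k "<bos>")).1)
      = fun pairs line => pairs ++ pairsLine (List.replicate k "<bos>") line := by
    funext pairs line; exact bline_eq line (List.replicate k "<bos>") pairs
  rw [hfA, hfB]
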